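-- pv_equiv track=rewrite | github.com/erayyap/bugcraft | step_synth/utils.py | is_within_one_damerau_levenshtein
-- ===== SOURCE A (Python) =====
-- def is_within_one_damerau_levenshtein(s1, s2):
--     """
--     Check if two strings are within one Damerau-Levenshtein distance,
--     considering substitutions, insertions/deletions, and transpositions.
--     """
--     if s1 == s2:
--         return True
--     if abs(len(s1) - len(s2)) > 1:
--         return False
--
--     len1, len2 = len(s1), len(s2)
--
--     if len1 == len2:
--         # Check for substitution or transposition
--         mismatches = []
--         for i in range(len1):
--             if s1[i] != s2[i]:
--                 mismatches.append(i)
--                 if len(mismatches) > 2: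
--                     return False
--         if len(mismatches) == 1:
--             # One substitution
--             return True
--         elif len(mismatches) == 2:
--             # Possible transposition
--             i, j = mismatches
--             if i + 1 == j and s1[i] == s2[j] and s1[j] == s2[i]:
--                 return True
--             else:
--                 return False
--         else:
--             return False
--     else:
--         # Check for insertion/deletion
--         # Ensure s1 is the shorter string
--         if len1 > len2:
--             s1, s2 = s2, s1
--             len1, len2 = len2, len1
--         # Now len2 == len1 + 1
--         i = j = 0
--         mismatch_found = False
--         while i < len1 and j < len2:
--             if s1[i] == s2[j]:
--                 i += 1
--                 j += 1
--             else:
--                 if mismatch_found: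
--                     return False
--                 mismatch_found = True
--                 j += 1  # Skip a character in the longer string
--         return True
-- ===== SOURCE B (Python) =====
-- def is_within_one_damerau_levenshtein(s1, s2):
--     """Strip the common prefix, then decide by direct slice comparisons."""
--     if s1 == s2:
--         return True
--     if abs(len(s1) - len(s2)) > 1:
--         return False
--     if len(s1) > len(s2):
--         s1, s2 = s2, s1
--     k = 0
--     while k < len(s1) and s1[k] == s2[k]:
--         k += 1
--     t1, t2 = s1[k:], s2[k:]
--     if len(t1) != len(t2):
--         # one insertion/deletion: rest must match after skipping one char
--         return t1 == t2[1:]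
--     # equal length, heads differ: substitution or adjacent transposition
--     return t1[1:] == t2[1:] or (
--         len(t1) > 1 and t1[0] == t2[1] and t1[1] == t2[0] and t1[2:] == t2[2:]
--     )
-- ===== Notes on version B (the rewrite author's own statement) =====
-- stated objective: simpler
-- what changed: Replaces A's mismatch-index collection loop (equal-length case) and two-pointer while-loop with flag (insert/delete case) by a single common-prefix strip followed by direct slice comparisons of the remaining tails.
import Mathlib
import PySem

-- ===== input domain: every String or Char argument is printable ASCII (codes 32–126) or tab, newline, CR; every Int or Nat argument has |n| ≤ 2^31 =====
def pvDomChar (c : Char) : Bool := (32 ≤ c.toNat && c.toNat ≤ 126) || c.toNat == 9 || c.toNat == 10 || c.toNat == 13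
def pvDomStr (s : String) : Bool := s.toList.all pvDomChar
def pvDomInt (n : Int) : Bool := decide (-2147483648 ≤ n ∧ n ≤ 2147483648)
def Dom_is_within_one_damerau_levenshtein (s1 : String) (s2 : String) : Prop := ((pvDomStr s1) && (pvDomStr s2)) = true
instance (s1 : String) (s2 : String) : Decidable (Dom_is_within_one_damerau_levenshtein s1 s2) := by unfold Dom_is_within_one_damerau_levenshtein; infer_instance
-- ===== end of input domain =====

-- B replaces A's mismatch-index collection and two-pointer state machine by a single
-- common-prefix strip followed by direct slice comparisons (objective: simpler).

-- ===== PORT A =====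
-- A's equal-length for-loop: walks both strings in step, appends each mismatching
-- index to `acc` and returns early (none = Python's `return False`) once it holds
-- more than two indices.
def pvCollect (l1 l2 : List Char) (i : Nat) (acc : List Nat) : Option (List Nat) :=
  match l1, l2 with
  | a :: t1, b :: t2 =>
      if a ≠ b then
        let acc' := acc ++ [i]
        if acc'.length > 2 then none else pvCollect t1 t2 (i + 1) acc'
      else pvCollect t1 t2 (i + 1) acc
  | _, _ => some acc

-- A's decision after the loop; the indices stored in the mismatch list are in range,
-- so `List.getD` is exactly Python's s[i] here.
def pvFinishEq (l1 l2 : List Char) (r : Option (List Nat)) : Bool :=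
  match r with
  | none => false
  | some [_] => true
  | some [i, j] =>
      decide (i + 1 = j) && (l1.getD i ' ' == l2.getD j ' ') && (l1.getD j ' ' == l2.getD i ' ')
  | some _ => false

-- A's two-pointer while-loop for the insertion/deletion case (l2 is the longer string).
def pvSkip (l1 l2 : List Char) (mf : Bool) : Bool :=
  match l1, l2 with
  | a :: t1, b :: t2 =>
      if a == b then pvSkip t1 t2 mf
      else if mf then false else pvSkip (a :: t1) t2 true
  | _, _ => true
termination_by l2.length
decreasing_by all_goals simp

def is_within_one_damerau_levenshtein (s1 : String) (s2 : String) : Bool :=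
  let l1 := s1.toList
  let l2 := s2.toList
  if l1 == l2 then true
  else if ((l1.length : Int) - (l2.length : Int)).natAbs > 1 then false
  else if l1.length = l2.length then pvFinishEq l1 l2 (pvCollect l1 l2 0 [])
  else if l1.length > l2.length then pvSkip l2 l1 false
  else pvSkip l1 l2 false

-- ===== PORT B =====
-- B's while-loop stripping the common prefix (k < len(s1) and s1[k] == s2[k]).
def pvStrip (l1 l2 : List Char) : List Char × List Char :=
  match l1, l2 with
  | a :: t1, b :: t2 => if a == b then pvStrip t1 t2 else (a :: t1, b :: t2)
  | _, _ => (l1, l2)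

def is_within_one_damerau_levenshtein_alt (s1 : String) (s2 : String) : Bool :=
  let l1 := s1.toList
  let l2 := s2.toList
  if l1 == l2 then true
  else if ((l1.length : Int) - (l2.length : Int)).natAbs > 1 then false
  else
    let p := if l1.length > l2.length then (l2, l1) else (l1, l2)
    let t := pvStrip p.1 p.2
    if t.1.length ≠ t.2.length then t.1 == t.2.drop 1
    else
      (t.1.drop 1 == t.2.drop 1) ||
        (decide (t.1.length > 1) && (t.1.getD 0 ' ' == t.2.getD 1 ' ') &&
          (t.1.getD 1 ' ' == t.2.getD 0 ' ') && (t.1.drop 2 == t.2.drop 2))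

-- ===== PRECONDITION & SPEC =====
def Spec_is_within_one_damerau_levenshtein (s1 : String) (s2 : String) (out : Bool) : Prop := out = is_within_one_damerau_levenshtein_alt s1 s2
instance (s1 : String) (s2 : String) (out : Bool) : Decidable (Spec_is_within_one_damerau_levenshtein s1 s2 out) := by unfold Spec_is_within_one_damerau_levenshtein; infer_instance

-- ===== CLAIM (what is proved, stated in full; the proofs are below) =====
def Claim_equal_is_within_one_damerau_levenshtein : Prop := ∀ (s1 : String) (s2 : String), Dom_is_within_one_damerau_levenshtein s1 s2 → Spec_is_within_one_damerau_levenshtein s1 s2 (is_within_one_damerau_levenshtein s1 s2)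

-- ===== LEMMAS AND PROOFS =====

theorem pvCollect_two : ∀ (t1 t2 : List Char) (j : Nat) (acc : List Nat),
    t1.length = t2.length → acc.length = 2 →
    pvCollect t1 t2 j acc = if t1 = t2 then some acc else none := by
  intro t1
  induction t1 with
  | nil =>
    intro t2 j acc hlen hacc
    cases t2 with
    | nil => simp [pvCollect]
    | cons b t2 => simp at hlen
  | cons a t1 ih =>
    intro t2 j acc hlen hacc
    cases t2 with
    | nil => simp at hlen
    | cons b t2 =>
      by_cases hab : a = b
      · subst hab
        simp [pvCollect, ih t2 (j + 1) acc (by simpa using hlen) hacc]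
      · simp [pvCollect, hab, hacc]

theorem pvFar : ∀ (t1 t2 : List Char) (s1 s2 : List Char) (j i0 : Nat),
    t1.length = t2.length → i0 + 1 < j →
    pvFinishEq s1 s2 (pvCollect t1 t2 j [i0]) = (t1 == t2) := by
  intro t1
  induction t1 with
  | nil =>
    intro t2 s1 s2 j i0 hlen hj
    cases t2 with
    | nil => simp [pvCollect, pvFinishEq]
    | cons b t2 => simp at hlen
  | cons a t1 ih =>
    intro t2 s1 s2 j i0 hlen hj
    cases t2 with
    | nil => simp at hlen
    | cons b t2 =>
      by_cases hab : a = b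
      · subst hab
        simpa [pvCollect] using ih t2 s1 s2 (j + 1) i0 (by simpa using hlen) (by omega)
      · have h2 := pvCollect_two t1 t2 (j + 1) [i0, j] (by simpa using hlen) (by simp)
        simp only [pvCollect]
        rw [if_pos hab]
        simp only [List.cons_append, List.nil_append, List.length_cons, List.length_nil]
        rw [if_neg (by omega), h2]
        split
        · have hne : ¬ (i0 + 1 = j) := by omega
          simp [pvFinishEq, hne, hab]
        · simp [pvFinishEq, hab]

-- B's equal-length decision applied to the stripped pair (a::t1, b::t2)
def pvBeq (a b : Char) (t1 t2 : List Char) : Bool :=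
  (t1 == t2) ||
    (decide ((a :: t1).length > 1) && ((a :: t1).getD 0 ' ' == (b :: t2).getD 1 ' ') &&
      ((a :: t1).getD 1 ' ' == (b :: t2).getD 0 ' ') && ((a :: t1).drop 2 == (b :: t2).drop 2))

theorem pvGetD_drop (s t : List Char) (i k : Nat) (h : s.drop i = t) :
    s.getD (i + k) ' ' = t.getD k ' ' := by
  simp [List.getD, ← List.getElem?_drop, h]

theorem pvAdj : ∀ (t1 t2 s1 s2 : List Char) (i0 : Nat) (a b : Char),
    t1.length = t2.length → a ≠ b →
    s1.drop i0 = a :: t1 → s2.drop i0 = b :: t2 →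
    pvFinishEq s1 s2 (pvCollect t1 t2 (i0 + 1) [i0]) = pvBeq a b t1 t2 := by
  intro t1 t2 s1 s2 i0 a b hlen hab hs1 hs2
  cases t1 with
  | nil =>
    cases t2 with
    | nil => simp [pvCollect, pvFinishEq, pvBeq]
    | cons d u2 => simp at hlen
  | cons c u1 =>
    cases t2 with
    | nil => simp at hlen
    | cons d u2 =>
      have ha : s1.getD (i0 + 0) ' ' = a := by simpa using pvGetD_drop s1 _ i0 0 hs1
      have hc : s1.getD (i0 + 1) ' ' = c := by simpa using pvGetD_drop s1 _ i0 1 hs1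
      have hb : s2.getD (i0 + 0) ' ' = b := by simpa using pvGetD_drop s2 _ i0 0 hs2
      have hd : s2.getD (i0 + 1) ' ' = d := by simpa using pvGetD_drop s2 _ i0 1 hs2
      simp only [Nat.add_zero] at ha hb
      by_cases hcd : c = d
      · subst hcd
        have hfar := pvFar u1 u2 s1 s2 (i0 + 2) i0 (by simpa using hlen) (by omega)
        have hstep : pvCollect (c :: u1) (c :: u2) (i0 + 1) [i0]
            = pvCollect u1 u2 (i0 + 2) [i0] := by simp [pvCollect]
        rw [hstep, hfar]
        by_cases hac : a = c
        · by_cases hcb : c = b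
          · exact absurd (hac.trans hcb) hab
          · simp [pvBeq, hac, hcb]
        · simp [pvBeq, hac]
      · have h2 := pvCollect_two u1 u2 (i0 + 2) [i0, i0 + 1] (by simpa using hlen) (by simp)
        simp only [pvCollect]
        rw [if_pos hcd]
        simp only [List.cons_append, List.nil_append, List.length_cons, List.length_nil]
        rw [if_neg (by omega)]
        rw [show i0 + 1 + 1 = i0 + 2 from rfl, h2]
        split
        · next hu =>
          subst hu
          simp only [pvFinishEq, pvBeq]
          rw [ha, hb, hc, hd]
          simp [hcd]
        · next hu =>
          simp [pvFinishEq, pvBeq, hcd, hu]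

theorem pvEqCase : ∀ (t1 t2 s1 s2 : List Char) (i : Nat),
    t1.length = t2.length → t1 ≠ t2 →
    s1.drop i = t1 → s2.drop i = t2 →
    pvFinishEq s1 s2 (pvCollect t1 t2 i []) =
      (let t := pvStrip t1 t2;
        (t.1.drop 1 == t.2.drop 1) ||
          (decide (t.1.length > 1) && (t.1.getD 0 ' ' == t.2.getD 1 ' ') &&
            (t.1.getD 1 ' ' == t.2.getD 0 ' ') && (t.1.drop 2 == t.2.drop 2))) := by
  intro t1
  induction t1 with
  | nil =>
    intro t2 s1 s2 i hlen hne hs1 hs2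
    cases t2 with
    | nil => exact absurd rfl hne
    | cons b t2 => simp at hlen
  | cons a t1 ih =>
    intro t2 s1 s2 i hlen hne hs1 hs2
    cases t2 with
    | nil => simp at hlen
    | cons b t2 =>
      by_cases hab : a = b
      · subst hab
        have hne' : t1 ≠ t2 := by intro h; exact hne (by rw [h])
        have hs1' : s1.drop (i + 1) = t1 := by
          have := congrArg (List.drop 1) hs1
          simpa [List.drop_drop, Nat.add_comm] using this
        have hs2' : s2.drop (i + 1) = t2 := by
          have := congrArg (List.drop 1) hs2
          simpa [List.drop_drop, Nat.add_comm] using this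
        have := ih t2 s1 s2 (i + 1) (by simpa using hlen) hne' hs1' hs2'
        simpa [pvCollect, pvStrip] using this
      · have hadj := pvAdj t1 t2 s1 s2 i a b (by simpa using hlen) hab hs1 hs2
        have hstep : pvCollect (a :: t1) (b :: t2) i []
            = pvCollect t1 t2 (i + 1) [i] := by
          simp only [pvCollect]
          rw [if_pos hab]
          simp
        rw [hstep, hadj]
        simp [pvStrip, hab, pvBeq]

theorem pvSkip2 : ∀ (t1 t2 : List Char), t1.length = t2.length →
    pvSkip t1 t2 true = (t1 == t2) := by
  intro t1
  induction t1 with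
  | nil =>
    intro t2 hlen
    cases t2 with
    | nil => simp [pvSkip]
    | cons b t2 => simp at hlen
  | cons a t1 ih =>
    intro t2 hlen
    cases t2 with
    | nil => simp at hlen
    | cons b t2 =>
      by_cases hab : a = b
      · subst hab
        simpa [pvSkip] using ih t2 (by simpa using hlen)
      · simp [pvSkip, hab]

theorem pvNeqCase : ∀ (l1 l2 : List Char), l2.length = l1.length + 1 →
    pvSkip l1 l2 false = ((pvStrip l1 l2).1 == (pvStrip l1 l2).2.drop 1) := by
  intro l1
  induction l1 with
  | nil =>
    intro l2 hlen
    cases l2 with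
    | nil => simp at hlen
    | cons b t2 =>
      have : t2 = [] := by
        cases t2 with
        | nil => rfl
        | cons c t => simp at hlen
      subst this
      simp [pvSkip, pvStrip]
  | cons a t1 ih =>
    intro l2 hlen
    cases l2 with
    | nil => simp at hlen
    | cons b t2 =>
      by_cases hab : a = b
      · subst hab
        simpa [pvSkip, pvStrip] using ih t2 (by simpa using hlen)
      · have hl : t2.length = t1.length + 1 := by simpa using hlen
        have h2 := pvSkip2 (a :: t1) t2 (by simp [hl])
        simp [pvSkip, pvStrip, hab, h2]

theorem pvStrip_len : ∀ (l1 l2 : List Char),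
    (pvStrip l1 l2).1.length + l2.length = (pvStrip l1 l2).2.length + l1.length := by
  intro l1
  induction l1 with
  | nil => intro l2; cases l2 <;> simp [pvStrip]
  | cons a t1 ih =>
    intro l2
    cases l2 with
    | nil => simp [pvStrip]
    | cons b t2 =>
      by_cases hab : a = b
      · subst hab
        have := ih t2
        simp [pvStrip]
        omega
      · simp [pvStrip, hab]
        omega

theorem pvCore : ∀ (l1 l2 : List Char),
    (if l1 == l2 then true
     else if ((l1.length : Int) - (l2.length : Int)).natAbs > 1 then false
     else if l1.length = l2.length then pvFinishEq l1 l2 (pvCollect l1 l2 0 [])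
     else if l1.length > l2.length then pvSkip l2 l1 false
     else pvSkip l1 l2 false)
    =
    (if l1 == l2 then true
     else if ((l1.length : Int) - (l2.length : Int)).natAbs > 1 then false
     else
       let p := if l1.length > l2.length then (l2, l1) else (l1, l2)
       let t := pvStrip p.1 p.2
       if t.1.length ≠ t.2.length then t.1 == t.2.drop 1
       else
         (t.1.drop 1 == t.2.drop 1) ||
           (decide (t.1.length > 1) && (t.1.getD 0 ' ' == t.2.getD 1 ' ') &&
             (t.1.getD 1 ' ' == t.2.getD 0 ' ') && (t.1.drop 2 == t.2.drop 2))) := by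
  intro l1 l2
  by_cases heq : l1 = l2
  · simp [heq]
  · by_cases hfar : ((l1.length : Int) - (l2.length : Int)).natAbs > 1
    · simp [heq, hfar]
    · by_cases hlen : l1.length = l2.length
      · have hgt : ¬ l1.length > l2.length := by omega
        have hst := pvStrip_len l1 l2
        have hts : ¬ ((pvStrip l1 l2).1.length ≠ (pvStrip l1 l2).2.length) := by omega
        simp only [beq_iff_eq, if_neg heq, if_neg hfar, if_pos hlen, if_neg hgt, if_neg hts]
        simpa using pvEqCase l1 l2 l1 l2 0 hlen heq (by simp) (by simp)
      · by_cases hgt : l1.length > l2.length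
        · have hst := pvStrip_len l2 l1
          have hts : (pvStrip l2 l1).1.length ≠ (pvStrip l2 l1).2.length := by omega
          simp only [beq_iff_eq, if_neg heq, if_neg hfar, if_neg hlen, if_pos hgt, if_pos hts]
          exact pvNeqCase l2 l1 (by omega)
        · have hst := pvStrip_len l1 l2
          have hts : (pvStrip l1 l2).1.length ≠ (pvStrip l1 l2).2.length := by omega
          simp only [beq_iff_eq, if_neg heq, if_neg hfar, if_neg hlen, if_neg hgt, if_pos hts]
          exact pvNeqCase l1 l2 (by omega)

-- ===== VERDICT (by name: the statement is the Claim_ definition above) =====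
theorem is_within_one_damerau_levenshtein_spec : Claim_equal_is_within_one_damerau_levenshtein := by
  intro s1 s2 _
  show is_within_one_damerau_levenshtein s1 s2 = is_within_one_damerau_levenshtein_alt s1 s2
  exact pvCore s1.toList s2.toList
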